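-- pv_equiv track=rewrite | github.com/rahulgolani/Algorithms-Dynamic-Programming | endlessPoints.py | getEndlessPoints
-- ===== SOURCE A (Python) =====
-- def getEndlessPoints(arr):
--     n=len(arr)
--     row=[[0 for j in range(n)]for i in range(n)]
--     col=[[0 for j in range(n)]for i in range(n)]
--     for i in range(n):
--         isEndless=1
--         for j in range(n-1,-1,-1):
--             if arr[i][j]==0:
--                 isEndless=0
--             row[i][j]=isEndless
--     for i in range(n):
--         isEndless=1
--         for j in range(n-1,-1,-1):
--             if arr[j][i]==0:
--                 isEndless=0
--             col[j][i]=isEndless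
--     result=0
--     for i in range(n):
--         for j in range(n):
--             if row[i][j] and col[i][j]:
--                 result+=1
--     return result
-- ===== SOURCE B (Python) =====
-- def getEndlessPoints(arr):
--     # One forward sweep over the rows maintains, per column, the index of the
--     # most recent zero (colLast); each row's own last-zero index (rowLast) is
--     # found on the fly, and the row's contribution is a comprehension count of
--     # columns whose indices lie strictly beyond both last-zero positions.
--     n = len(arr)
--     colLast = [-1] * n
--     for i in range(n):
--         r = arr[i]
--         colLast = [i if r[j] == 0 else colLast[j] for j in range(n)]
--     total = 0
--     for i in range(n):
--         r = arr[i]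
--         rowLast = -1
--         for j in range(n):
--             if r[j] == 0:
--                 rowLast = j
--         total += sum(1 for j in range(n) if rowLast < j and colLast[j] < i)
--     return total
-- ===== Notes on version B (the rewrite author's own statement) =====
-- stated objective: alternative
-- what changed: B drops A's two n x n 0/1 matrices and backward suffix scans: one forward sweep over the rows maintains a single length-n per-column last-zero-index array, each row's own last-zero index is computed on the fly, and a cell is counted when both indices lie strictly beyond those boundaries, using O(n) instead of O(n^2) extra memory.
import Mathlib
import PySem

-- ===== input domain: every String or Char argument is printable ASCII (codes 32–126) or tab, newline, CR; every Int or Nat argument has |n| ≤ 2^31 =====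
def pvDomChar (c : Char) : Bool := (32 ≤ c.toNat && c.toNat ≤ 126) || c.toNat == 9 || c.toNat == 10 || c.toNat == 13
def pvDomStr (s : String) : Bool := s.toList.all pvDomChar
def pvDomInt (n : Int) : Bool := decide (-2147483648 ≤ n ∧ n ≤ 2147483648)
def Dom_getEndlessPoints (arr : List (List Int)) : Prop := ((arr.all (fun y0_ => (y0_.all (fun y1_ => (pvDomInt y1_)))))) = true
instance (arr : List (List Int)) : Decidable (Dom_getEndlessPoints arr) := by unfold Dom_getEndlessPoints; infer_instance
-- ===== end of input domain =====

-- B replaces A's two n×n 0/1 suffix matrices by a single forward sweep keeping a length-n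
-- per-column last-zero-index array plus an on-the-fly per-row last-zero index; same count,
-- O(n) instead of O(n²) extra memory (objective: alternative).

-- ===== PORT A =====
-- Shared body of A's two textually identical backward loops (they differ only in the
-- accessed cell arr[i][j] vs arr[j][i], abstracted as `get`): state = (isEndless, line),
-- 'line[j] = isEndless' ported as List.set (j always in [0,n), as in the Python).
-- arr[i][j] is ported as pyGetD …; Python raises IndexError exactly where the index is
-- out of range — those inputs are excluded by Pre_getEndlessPoints below.
def aLine (get : Int → Int) (n : Nat) : Int × List Int :=
  (PySem.List.pyRange ((n : Int) - 1) (-1) (-1)).foldl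
    (fun st j =>
      let e := if get j = 0 then (0 : Int) else st.1
      (e, st.2.set j.toNat e))
    (1, List.replicate n 0)

-- A's `col` is written one column per outer iteration (col[j][i] for all j); we store the
-- columns as the rows of `colT` (same values; A's col[i][j] is read back as colT[j][i]).
def getEndlessPoints (arr : List (List Int)) : Int :=
  let n := arr.length
  let row := (PySem.List.pyRange 0 n 1).map
    (fun i => (aLine (fun j => PySem.List.pyGetD (PySem.List.pyGetD arr i []) j 0) n).2)
  let colT := (PySem.List.pyRange 0 n 1).map
    (fun i => (aLine (fun j => PySem.List.pyGetD (PySem.List.pyGetD arr j []) i 0) n).2)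
  (PySem.List.pyRange 0 n 1).foldl (fun res i =>
    (PySem.List.pyRange 0 n 1).foldl (fun res j =>
      if PySem.List.pyGetD (PySem.List.pyGetD row i []) j 0 ≠ 0 ∧
         PySem.List.pyGetD (PySem.List.pyGetD colT j []) i 0 ≠ 0
      then res + 1 else res) res) 0

-- ===== PORT B =====
-- Source B: one forward sweep; `colLast` is rebuilt by the list comprehension each row
-- (ported as List.range/map), rowLast by the inner forward loop, the row's contribution
-- by the comprehension count (ported as countP).
def getEndlessPoints_alt (arr : List (List Int)) : Int :=
  let n := arr.length
  let colLast := (List.range n).foldl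
    (fun acc i =>
      let r := arr.getD i []
      (List.range n).map (fun j => if r.getD j 0 = 0 then (i : Int) else acc.getD j 0))
    (List.replicate n (-1))
  (List.range n).foldl
    (fun total i =>
      let r := arr.getD i []
      let rowLast := (List.range n).foldl (fun t j => if r.getD j 0 = 0 then (j : Int) else t) (-1)
      total + (((List.range n).countP
        (fun j : Nat => decide (rowLast < (j : Int) ∧ colLast.getD j 0 < (i : Int)))) : Int))
    0

-- ===== PRECONDITION & SPEC =====
-- Pre_ excludes exactly the inputs on which the Python A raises IndexError:
-- A reads arr[i][j] and arr[j][i] for all i, j < len(arr), so it returns normally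
-- iff every row has length ≥ len(arr).
def Pre_getEndlessPoints (arr : List (List Int)) : Prop :=
  (arr.all (fun r => arr.length ≤ r.length)) = true
instance (arr : List (List Int)) : Decidable (Pre_getEndlessPoints arr) := by
  unfold Pre_getEndlessPoints; infer_instance

def pvWitness_getEndlessPoints : List (List Int) := [[1, 0], [2, 3]]

def Spec_getEndlessPoints (arr : List (List Int)) (out : Int) : Prop := out = getEndlessPoints_alt arr
instance (arr : List (List Int)) (out : Int) : Decidable (Spec_getEndlessPoints arr out) := by
  unfold Spec_getEndlessPoints; infer_instance

-- ===== CLAIM (what is proved, stated in full; the proofs are below) =====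
def Claim_equal_getEndlessPoints : Prop := ∀ (arr : List (List Int)), Dom_getEndlessPoints arr → Pre_getEndlessPoints arr → Spec_getEndlessPoints arr (getEndlessPoints arr)

-- ===== LEMMAS AND PROOFS =====

-- "some k with j ≤ k < m has get k = 0" — the common characterisation of both ports.
def hasZero (get : Int → Int) (j m : Nat) : Bool :=
  (List.range m).any (fun k => decide (j ≤ k) && decide (get k = 0))

theorem hasZero_succ (get : Int → Int) (j m : Nat) :
    hasZero get j (m + 1) = (hasZero get j m || (decide (j ≤ m) && decide (get m = 0))) := by
  simp [hasZero, List.range_succ]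

theorem hasZero_of_ge (get : Int → Int) (j m : Nat) (h : m ≤ j) :
    hasZero get j m = false := by
  simp only [hasZero, List.any_eq_false]
  intro k hk
  simp only [List.mem_range] at hk
  simp [Nat.not_le.mpr (Nat.lt_of_lt_of_le hk h)]

theorem hasZero_congr (get get' : Int → Int) (j m : Nat)
    (h : ∀ k : Nat, k < m → get k = get' k) : hasZero get j m = hasZero get' j m := by
  induction m with
  | zero => rfl
  | succ m ih =>
      rw [hasZero_succ, hasZero_succ, ih (fun k hk => h k (Nat.lt_succ_of_lt hk)),
          h m (Nat.lt_succ_self m)]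

-- Characterisation of A's backward line loop: after processing j = m-1 … 0 starting from
-- flag e0, entry j (j < m) holds 0 if some zero lies at an index in [j, m), else e0;
-- entries ≥ m are untouched.
theorem aLine_fold (get : Int → Int) (m : Nat) (e0 : Int) (L0 : List Int) :
    ((PySem.List.pyRange ((m : Int) - 1) (-1) (-1)).foldl
      (fun st j =>
        let e := if get j = 0 then (0 : Int) else st.1
        (e, st.2.set j.toNat e))
      (e0, L0)).2.length = L0.length ∧
    (∀ j : Nat, j < m → j < L0.length →
      ((PySem.List.pyRange ((m : Int) - 1) (-1) (-1)).foldl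
        (fun st j =>
          let e := if get j = 0 then (0 : Int) else st.1
          (e, st.2.set j.toNat e))
        (e0, L0)).2.getD j 0 = if hasZero get j m then 0 else e0) ∧
    (∀ j : Nat, m ≤ j →
      ((PySem.List.pyRange ((m : Int) - 1) (-1) (-1)).foldl
        (fun st j =>
          let e := if get j = 0 then (0 : Int) else st.1
          (e, st.2.set j.toNat e))
        (e0, L0)).2.getD j 0 = L0.getD j 0) := by
  induction m generalizing e0 L0 with
  | zero =>
      rw [PySem.List.pyRange_neg_one_eq_nil (by norm_num)]
      exact ⟨rfl, fun j hj _ => absurd hj (Nat.not_lt_zero j), fun j _ => rfl⟩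
  | succ m ih =>
      have hcons : PySem.List.pyRange (((m : Nat) + 1 : Int) - 1) (-1) (-1)
          = (m : Int) :: PySem.List.pyRange ((m : Int) - 1) (-1) (-1) := by
        rw [show (((m : Nat) + 1 : Int) - 1) = (m : Int) by ring]
        exact PySem.List.pyRange_neg_one_cons (by omega)
      rw [show (((m + 1 : Nat) : Int) - 1) = (((m : Nat) + 1 : Int) - 1) by push_cast; ring]
      rw [hcons]
      simp only [List.foldl_cons, Int.toNat_natCast]
      obtain ⟨ih1, ih2, ih3⟩ := ih (if get (m : Int) = 0 then (0 : Int) else e0)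
        (L0.set m (if get (m : Int) = 0 then (0 : Int) else e0))
      refine ⟨by simpa using ih1, ?_, ?_⟩
      · intro j hj hjL
        rcases Nat.lt_succ_iff_lt_or_eq.mp hj with hjm | rfl
        · rw [ih2 j hjm (by simpa using hjL)]
          rw [hasZero_succ]
          by_cases h0 : get (m : Int) = 0
          · simp [h0, decide_eq_true (Nat.le_of_lt hjm)]
          · simp [h0]
        · rw [ih3 j le_rfl]
          rw [List.getD_eq_getElem?_getD, List.getElem?_set_self hjL]
          rw [hasZero_succ, hasZero_of_ge get j j le_rfl]
          by_cases h0 : get (j : Int) = 0 <;> simp [h0]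
      · intro j hj
        rw [ih3 j (Nat.le_of_succ_le hj)]
        rw [List.getD_eq_getElem?_getD, List.getD_eq_getElem?_getD,
            List.getElem?_set_ne (by omega)]

-- entry j of A's line (the only values the final count reads).
theorem aLine_entry (get : Int → Int) (n j : Nat) (hj : j < n) :
    PySem.List.pyGetD ((aLine get n).2) (j : Int) 0 = if hasZero get j n then 0 else 1 := by
  obtain ⟨-, h2, -⟩ := aLine_fold get n 1 (List.replicate n 0)
  rw [PySem.List.pyGetD_natCast]
  exact h2 j hj (by simpa using hj)

-- B's forward last-zero scan over range(m), generic in the accessed value.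
def fwdLast (get : Nat → Int) (m : Nat) : Int :=
  (List.range m).foldl (fun t j => if get j = 0 then (j : Int) else t) (-1)

theorem fwdLast_succ (get : Nat → Int) (m : Nat) :
    fwdLast get (m + 1) = if get m = 0 then (m : Int) else fwdLast get m := by
  simp [fwdLast, List.range_succ]

theorem fwdLast_lt (get : Nat → Int) (m : Nat) : fwdLast get m < (m : Int) := by
  induction m with
  | zero => simp [fwdLast]
  | succ m ih =>
      rw [fwdLast_succ]
      by_cases h0 : get m = 0
      · simp only [h0, if_true]; push_cast; omega
      · simp only [h0, if_false]; push_cast at ih ⊢; omega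

-- B's index comparison ↔ "no zero at indices in [j, m)".
theorem fwdLast_iff (get : Nat → Int) (m j : Nat) (hj : j ≤ m) :
    (fwdLast get m < (j : Int)) ↔ hasZero (fun z => get z.toNat) j m = false := by
  induction m with
  | zero =>
      interval_cases j
      simp [fwdLast, hasZero]
  | succ m ih =>
      rw [fwdLast_succ, hasZero_succ]
      by_cases h0 : get m = 0
      · have h0' : (fun z : Int => get z.toNat) (m : Int) = 0 := by simpa using h0
        simp only [h0, h0', if_true, decide_true, Bool.and_true, Bool.or_eq_false_iff]
        rw [Nat.cast_lt]
        constructor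
        · intro h
          exact ⟨hasZero_of_ge _ j m (Nat.le_of_lt h), by simp [Nat.not_le.mpr h]⟩
        · rintro ⟨-, h2⟩
          simp only [decide_eq_false_iff_not, Nat.not_le] at h2
          omega
      · have h0' : ¬ (fun z : Int => get z.toNat) (m : Int) = 0 := by simpa using h0
        simp only [h0, h0', if_false, show (decide False) = false from rfl,
          Bool.and_false, Bool.or_false]
        rcases Nat.lt_succ_iff_lt_or_eq.mp (Nat.lt_succ_of_le hj) with hjm | rfl
        · exact ih (Nat.le_of_lt_succ hjm)
        · have h1 : fwdLast get m < ((m + 1 : Nat) : Int) := by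
            have := fwdLast_lt get m; push_cast; omega
          have h2 : hasZero (fun z : Int => get z.toNat) (m + 1) m = false :=
            hasZero_of_ge _ (m + 1) m (Nat.le_succ m)
          exact ⟨fun _ => h2, fun _ => h1⟩

-- B's colLast fold: always length n, entry j = forward last-zero of column j over the rows seen.
theorem colFold_char (arr : List (List Int)) (n m : Nat) :
    ((List.range m).foldl
      (fun acc i =>
        let r := arr.getD i []
        (List.range n).map (fun j => if r.getD j 0 = 0 then (i : Int) else acc.getD j 0))
      (List.replicate n (-1))).length = n ∧
    (∀ j : Nat, j < n →
      ((List.range m).foldl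
        (fun acc i =>
          let r := arr.getD i []
          (List.range n).map (fun j => if r.getD j 0 = 0 then (i : Int) else acc.getD j 0))
        (List.replicate n (-1))).getD j 0 = fwdLast (fun i => (arr.getD i []).getD j 0) m) := by
  induction m with
  | zero =>
      refine ⟨by simp, fun j hj => ?_⟩
      simp [fwdLast, hj]
  | succ m ih =>
      obtain ⟨ih1, ih2⟩ := ih
      rw [List.range_succ, List.foldl_append, List.foldl_cons, List.foldl_nil]
      refine ⟨by simp, fun j hj => ?_⟩
      have hmap : ∀ (f : Nat → Int), ((List.range n).map f).getD j 0 = f j := by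
        intro f
        rw [List.getD_eq_getElem?_getD, List.getElem?_map, List.getElem?_range hj]
        rfl
      simp only
      rw [hmap, fwdLast_succ]
      rcases eq_or_ne ((arr.getD m []).getD j 0) 0 with h0 | h0
      · rw [if_pos h0, if_pos h0]
      · rw [if_neg h0, if_neg h0, ih2 j hj]

-- A's 0/1 entry test rephrased as hasZero = false.
theorem aEntry_ne_iff (get : Int → Int) (n j : Nat) (hj : j < n) :
    (¬ PySem.List.pyGetD ((aLine get n).2) (j : Int) 0 = 0) ↔ hasZero get j n = false := by
  rw [aLine_entry get n j hj]
  by_cases h : hasZero get j n <;> simp [h]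

-- A's 0/1 test on a line equals B's index comparison, generic in the two accessors.
theorem cond_iff_gen (gI : Int → Int) (gN : Nat → Int) (h : ∀ k : Nat, gI (k : Int) = gN k)
    (n j : Nat) (hj : j < n) :
    (¬ PySem.List.pyGetD ((aLine gI n).2) (j : Int) 0 = 0) ↔ fwdLast gN n < (j : Int) := by
  rw [aEntry_ne_iff _ _ _ hj, fwdLast_iff _ _ _ (Nat.le_of_lt hj),
      hasZero_congr gI (fun z => gN z.toNat) j n
        (fun k _ => by rw [h k]; exact congrArg gN (Int.toNat_natCast k).symm)]

theorem getD_map_range {α : Type} (f : Nat → α) (d : α) (n j : Nat) (hj : j < n) :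
    ((List.range n).map f).getD j d = f j := by
  rw [List.getD_eq_getElem?_getD, List.getElem?_map, List.getElem?_range hj]
  rfl

theorem ab_eq (arr : List (List Int)) : getEndlessPoints arr = getEndlessPoints_alt arr := by
  simp only [getEndlessPoints, getEndlessPoints_alt]
  set n := arr.length with hn
  obtain ⟨hlen, hchar⟩ := colFold_char arr n n
  have hr : PySem.List.pyRange 0 (n : Int) 1 = (List.range n).map (fun k : Nat => (k : Int)) := by
    rw [PySem.List.pyRange_one]
    simp
  rw [hr]
  simp only [List.foldl_map, List.map_map, Function.comp_def]
  apply PySem.List.foldl_congr_mem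
  intro res i hi
  have hi' : i < n := List.mem_range.mp hi
  rw [PySem.List.foldl_ite_add_one]
  congr 1
  rw [Int.natCast_inj]
  apply List.countP_congr
  intro j hj
  have hj' : j < n := List.mem_range.mp hj
  have hrow :
      PySem.List.pyGetD ((List.range n).map
        (fun k : Nat => (aLine (fun z => PySem.List.pyGetD (PySem.List.pyGetD arr (k : Int) []) z 0) n).2)) (i : Int) []
      = (aLine (fun z => PySem.List.pyGetD (PySem.List.pyGetD arr (i : Int) []) z 0) n).2 := by
    rw [PySem.List.pyGetD_natCast, getD_map_range _ _ _ _ hi']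
  have hcol :
      PySem.List.pyGetD ((List.range n).map
        (fun k : Nat => (aLine (fun z => PySem.List.pyGetD (PySem.List.pyGetD arr z []) (k : Int) 0) n).2)) (j : Int) []
      = (aLine (fun z => PySem.List.pyGetD (PySem.List.pyGetD arr z []) (j : Int) 0) n).2 := by
    rw [PySem.List.pyGetD_natCast, getD_map_range _ _ _ _ hj']
  rw [hrow, hcol, hchar j hj', decide_eq_true_eq, decide_eq_true_eq]
  apply and_congr
  · exact cond_iff_gen _ (fun z => (arr.getD i []).getD z 0)
      (fun k => by rw [PySem.List.pyGetD_natCast, PySem.List.pyGetD_natCast]) n j hj'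
  · exact cond_iff_gen _ (fun k => (arr.getD k []).getD j 0)
      (fun k => by rw [PySem.List.pyGetD_natCast, PySem.List.pyGetD_natCast]) n i hi'

-- ===== VERDICT (by name: the statement is the Claim_ definition above) =====
theorem getEndlessPoints_spec : Claim_equal_getEndlessPoints := by
  intro arr _ _
  exact ab_eq arr
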